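-- pv_equiv track=rewrite | github.com/nulven/nfl_analysis | games.py | sum_records_season
-- ===== SOURCE A (Python) =====
-- def sum_records_season(records):
--     res = []
--     for season in records:
--         rec = (0, 0, 0)
--         for week in season:
--             w, l, t = week
--             rec = (rec[0]+w, rec[1]+l, rec[2]+t)
--         res.append(rec)
--     return res
-- ===== SOURCE B (Python) =====
-- def sum_records_season(records):
--     return [tuple(map(sum, zip(*season))) if season else (0, 0, 0)
--             for season in records]
-- ===== Notes on version B (the rewrite author's own statement) =====
-- stated objective: idiomatic
-- what changed: Replaces the explicit nested loops with a running triple accumulator by a list comprehension that transposes each season with zip(*season) and sums each column.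
import Mathlib
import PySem

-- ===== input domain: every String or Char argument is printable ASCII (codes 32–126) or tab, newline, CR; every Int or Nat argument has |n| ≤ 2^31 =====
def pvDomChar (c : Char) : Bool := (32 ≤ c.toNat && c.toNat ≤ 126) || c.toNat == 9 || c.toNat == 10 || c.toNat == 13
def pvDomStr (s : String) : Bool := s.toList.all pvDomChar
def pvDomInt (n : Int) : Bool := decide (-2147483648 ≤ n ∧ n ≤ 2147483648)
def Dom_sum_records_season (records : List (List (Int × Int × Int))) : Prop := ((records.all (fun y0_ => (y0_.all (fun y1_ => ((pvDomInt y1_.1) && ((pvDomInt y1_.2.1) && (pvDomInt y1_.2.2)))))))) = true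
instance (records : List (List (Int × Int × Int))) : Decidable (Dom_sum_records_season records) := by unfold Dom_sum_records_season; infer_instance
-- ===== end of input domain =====

-- B replaces A's running-triple accumulator loop by a per-season column-wise transpose-and-sum (idiomatic decomposition).


-- ===== PORT A =====
def sum_records_season (records : List (List (Int × Int × Int))) : List (Int × Int × Int) :=
  records.foldl (fun res season =>
    res ++ [season.foldl (fun rec week => (rec.1 + week.1, rec.2.1 + week.2.1, rec.2.2 + week.2.2)) (0, 0, 0)]) []

-- ===== PORT B =====
def sum_records_season_alt (records : List (List (Int × Int × Int))) : List (Int × Int × Int) :=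
  records.map (fun season =>
    if season = [] then (0, 0, 0)
    else ((season.map (·.1)).sum, (season.map (·.2.1)).sum, (season.map (·.2.2)).sum))

-- ===== PRECONDITION & SPEC =====
def Spec_sum_records_season (records : List (List (Int × Int × Int))) (out : List (Int × Int × Int)) : Prop := out = sum_records_season_alt records
instance (records : List (List (Int × Int × Int))) (out : List (Int × Int × Int)) : Decidable (Spec_sum_records_season records out) := by unfold Spec_sum_records_season; infer_instance

-- ===== CLAIM (what is proved, stated in full; the proofs are below) =====
def Claim_equal_sum_records_season : Prop := ∀ (records : List (List (Int × Int × Int))), Dom_sum_records_season records → Spec_sum_records_season records (sum_records_season records)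

-- ===== LEMMAS AND PROOFS =====

-- ===== VERDICT (by name: the statement is the Claim_ definition above) =====
lemma season_foldl_eq (season : List (Int × Int × Int)) (a b c : Int) :
    season.foldl (fun rec week => (rec.1 + week.1, rec.2.1 + week.2.1, rec.2.2 + week.2.2)) (a, b, c)
      = (a + (season.map (·.1)).sum, b + (season.map (·.2.1)).sum, c + (season.map (·.2.2)).sum) := by
  induction season generalizing a b c with
  | nil => simp
  | cons w ws ih => simp [List.foldl, ih]; ring_nf; exact ⟨trivial, trivial, trivial⟩

theorem sum_records_season_spec : Claim_equal_sum_records_season := by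
  intro records _
  unfold Spec_sum_records_season sum_records_season sum_records_season_alt
  rw [PySem.List.foldl_append_singleton_eq_map]
  refine List.map_congr_left (fun season _ => ?_)
  rw [season_foldl_eq]
  cases season <;> simp
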